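-- pv_equiv track=rewrite | github.com/MelanieOT7/Test_001_Prep | student_code.py | break_test
-- ===== SOURCE A (Python) =====
-- def break_test(n: int, length: int):
--     """
--     Generate a list of numbers from 1 to length, stopping when a specific number is encountered.
--
--     Parameters:
--     n (int): The number at which to stop adding to the list.
--     length (int): The upper limit for generating numbers.
--
--     Returns:
--     list: A list of integers from 1 to length, excluding n and stopping before it.
--     """
--     _list = []
--     for i in range(1,length+1):
--         if i != n:
--             _list.append(i)
--         else:
--             break
--     return _list
-- ===== SOURCE B (Python) =====
-- def break_test(n: int, length: int):
--     return list(range(1, n if 1 <= n <= length else length + 1))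
-- ===== Notes on version B (the rewrite author's own statement) =====
-- stated objective: simpler
-- what changed: Replaced the element-by-element loop with break by a closed-form cutoff: range(1, n) when 1 <= n <= length, else the full range(1, length+1).
import Mathlib
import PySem

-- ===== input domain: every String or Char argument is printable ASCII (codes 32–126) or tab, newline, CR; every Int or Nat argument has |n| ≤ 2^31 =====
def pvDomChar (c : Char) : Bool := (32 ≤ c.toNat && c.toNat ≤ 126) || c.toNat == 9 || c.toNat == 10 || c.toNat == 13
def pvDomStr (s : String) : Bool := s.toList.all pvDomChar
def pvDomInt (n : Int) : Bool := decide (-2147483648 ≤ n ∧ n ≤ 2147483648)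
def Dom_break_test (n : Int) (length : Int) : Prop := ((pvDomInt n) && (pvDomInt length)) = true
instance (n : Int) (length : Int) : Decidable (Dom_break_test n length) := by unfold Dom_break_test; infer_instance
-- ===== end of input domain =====

-- B replaces A's scan-with-break loop by a closed-form range cutoff (objective: simpler).


-- ===== PORT A =====
-- loop with break: recurse over range(1, length+1), appending i while i != n, stopping at n
def pvBreakLoop (n : Int) (acc : List Int) : List Int → List Int
  | [] => acc
  | i :: rest => if i ≠ n then pvBreakLoop n (acc ++ [i]) rest else acc

def break_test (n : Int) (length : Int) : List Int :=
  pvBreakLoop n [] (PySem.List.pyRange 1 (length + 1) 1)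

-- ===== PORT B =====
def break_test_alt (n : Int) (length : Int) : List Int :=
  PySem.List.pyRange 1 (if 1 ≤ n ∧ n ≤ length then n else length + 1) 1

-- ===== PRECONDITION & SPEC =====
def Spec_break_test (n : Int) (length : Int) (out : List Int) : Prop := out = break_test_alt n length
instance (n : Int) (length : Int) (out : List Int) : Decidable (Spec_break_test n length out) := by unfold Spec_break_test; infer_instance

-- ===== CLAIM (what is proved, stated in full; the proofs are below) =====
def Claim_equal_break_test : Prop := ∀ (n : Int) (length : Int), Dom_break_test n length → Spec_break_test n length (break_test n length)

-- ===== LEMMAS AND PROOFS =====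

-- ===== VERDICT (by name: the statement is the Claim_ definition above) =====
lemma pvBreakLoop_eq_takeWhile (n : Int) : ∀ (l : List Int) (acc : List Int),
    pvBreakLoop n acc l = acc ++ l.takeWhile (fun i => i ≠ n) := by
  intro l
  induction l with
  | nil => intro acc; simp [pvBreakLoop]
  | cons i rest ih =>
    intro acc
    by_cases h : i = n
    · simp [pvBreakLoop, h, List.takeWhile]
    · simp [pvBreakLoop, h, List.takeWhile, ih]

lemma pvTakeWhile_pyRange (n : Int) : ∀ (k : Nat) (a b : Int), b - a = (k : Int) →
    (PySem.List.pyRange a b 1).takeWhile (fun i => i ≠ n)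
      = PySem.List.pyRange a (if a ≤ n ∧ n < b then n else b) 1 := by
  intro k
  induction k with
  | zero =>
    intro a b hab
    have hba : b ≤ a := by omega
    rw [PySem.List.pyRange_one_eq_nil hba]
    have hno : ¬ (a ≤ n ∧ n < b) := by omega
    rw [if_neg hno, PySem.List.pyRange_one_eq_nil hba]
    simp
  | succ k ih =>
    intro a b hab
    have hlt : a < b := by omega
    rw [PySem.List.pyRange_one_cons hlt]
    by_cases h : a = n
    · subst h
      simp only [List.takeWhile]
      rw [if_pos (by omega : a ≤ a ∧ a < b), PySem.List.pyRange_one_eq_nil (le_refl a)]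
      simp
    · simp only [List.takeWhile, ne_eq, h, not_false_eq_true, decide_true]
      rw [ih (a+1) b (by omega)]
      by_cases h2 : a ≤ n ∧ n < b
      · have h3 : a + 1 ≤ n ∧ n < b := by omega
        rw [if_pos h3, if_pos h2, PySem.List.pyRange_one_cons (by omega : a < n)]
      · have h3 : ¬ (a + 1 ≤ n ∧ n < b) := by omega
        rw [if_neg h3, if_neg h2, PySem.List.pyRange_one_cons hlt]

theorem break_test_spec : Claim_equal_break_test := by
  intro n length _
  unfold Spec_break_test break_test break_test_alt
  rw [pvBreakLoop_eq_takeWhile, List.nil_append]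
  by_cases hL : 0 ≤ length
  · rw [pvTakeWhile_pyRange n length.toNat 1 (length + 1) (by omega)]
    congr 1
    by_cases h : 1 ≤ n ∧ n ≤ length
    · rw [if_pos (by omega : (1:Int) ≤ n ∧ n < length + 1), if_pos h]
    · rw [if_neg (by omega : ¬((1:Int) ≤ n ∧ n < length + 1)), if_neg h]
  · rw [PySem.List.pyRange_one_eq_nil (by omega : length + 1 ≤ 1)]
    rw [if_neg (by omega : ¬(1 ≤ n ∧ n ≤ length)),
        PySem.List.pyRange_one_eq_nil (by omega : length + 1 ≤ 1)]
    simp
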